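-- pv_equiv track=rewrite | github.com/poemsilver/Algorithm | on Programmers/[L3] 2차원 동전 뒤집기.py | solution
-- ===== SOURCE A (Python) =====
-- def solution(beginning, target):
--     answer = 0
--     if beginning == target:
--         return 0
--     x = len(beginning)
--     y = len(beginning[0])
--
--     # 뒤집기
--     def flip(index,xy):
--         # 행(x축) 뒤집기
--         if xy == 1:
--             trans = beginning[index]
--             for i in range(y):
--                 trans[i] = 1 - trans[i]
--             beginning[index] = trans
--         # 열(y축) 뒤집기 (xy = 0)
--         else:
--             for xx in range(x):
--                 beginning[xx][index] = 1 - beginning[xx][index]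
--         return beginning
--
--     # check = []
--     # # 아예 정반대이면 행, 열 중 작은거 리턴
--     # for xx in range(x):
--     #     temp = [0 for _ in range(y)]
--     #     for yy in range(y):
--     #         temp[yy] = 1 - beginning[xx][yy]
--     #     check.append(temp)
--     # if check == target:
--     #     return min(x,y)
--
--     for x1 in range(x):
--         now = beginning[x1]
--         t = target[x1]
--         if now == t:
--             continue
--         diff = 0
--         for y1 in range(y):
--             if now[y1] != t[y1]:
--                 diff += 1
--         # 다른게 더 많으면 아예 반대로
--         if diff > y/2:
--             for y2 in range(y):
--                 if now[y2] == t[y2]: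
--                     # 해당 열 뒤집기
--                     flip(y2,0)
--                     answer += 1
--             # 해당 행 뒤집기
--             flip(x1,1)
--             answer += 1
--         # 타겟과 같게
--         else:
--             for y2 in range(y):
--                 if now[y2] != t[y2]:
--                     flip(y2,0)
--                     answer += 1
--
--     if beginning != target:
--         return -1
--     return answer
-- ===== SOURCE B (Python) =====
-- def solution(beginning, target):
--     # Bit-parallel reformulation: each row's "matches target" / "matches flipped
--     # target" sets are packed into integer bitmasks; column-flip parity is one
--     # integer `odd`, updated by XOR, and counts come from popcounts -- no grid
--     # mutation at all (A mutates `beginning` in place; B only reads it).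
--     if beginning == target:
--         return 0
--     x, y = len(beginning), len(beginning[0])
--     full = (1 << y) - 1
--
--     def popcount(m):
--         c = 0
--         while m:
--             c += m & 1
--             m >>= 1
--         return c
--
--     E, F = [], []
--     for bi, ti in zip(beginning, target):
--         e = f = 0
--         for j in range(y):
--             if bi[j] == ti[j]:
--                 e |= 1 << j
--             if 1 - bi[j] == ti[j]:
--                 f |= 1 << j
--         E.append(e)
--         F.append(f)
--
--     odd = 0        # parity bitmask of column flips so far
--     rowflip = 0    # bit i set iff row i was flipped
--     answer = 0
--     for i in range(x):
--         m = (E[i] & (full ^ odd)) | (F[i] & odd)   # columns currently matching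
--         matched = popcount(m)
--         if matched == y:
--             continue
--         if 2 * (y - matched) > y:
--             toggles = m            # flip every matching column, then the row
--             rowflip |= 1 << i
--             answer += 1
--         else:
--             toggles = full ^ m     # flip every differing column
--         odd ^= toggles
--         answer += popcount(toggles)
--     for i in range(x):
--         q = odd ^ (full if (rowflip >> i) & 1 else 0)
--         if (E[i] & (full ^ q)) | (F[i] & q) != full:
--             return -1
--     return answer
-- ===== Notes on version B (the rewrite author's own statement) =====
-- stated objective: faster
-- what changed: B packs each row's match/anti-match pattern into integer bitmasks built in one pre-pass, keeps the column-flip state as a single XOR-updated parity integer and counts flips with popcounts, replacing A's physical O(x)-per-column-flip grid mutation and whole-list comparisons.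
-- outside the precondition, e.g. on solution([[0]], [[0], [1]]): A returns -1, B returns 0; on solution([[0, 1], [0]], [[9, 9], [0]]): A returns -1, B raises IndexError
import Mathlib
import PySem

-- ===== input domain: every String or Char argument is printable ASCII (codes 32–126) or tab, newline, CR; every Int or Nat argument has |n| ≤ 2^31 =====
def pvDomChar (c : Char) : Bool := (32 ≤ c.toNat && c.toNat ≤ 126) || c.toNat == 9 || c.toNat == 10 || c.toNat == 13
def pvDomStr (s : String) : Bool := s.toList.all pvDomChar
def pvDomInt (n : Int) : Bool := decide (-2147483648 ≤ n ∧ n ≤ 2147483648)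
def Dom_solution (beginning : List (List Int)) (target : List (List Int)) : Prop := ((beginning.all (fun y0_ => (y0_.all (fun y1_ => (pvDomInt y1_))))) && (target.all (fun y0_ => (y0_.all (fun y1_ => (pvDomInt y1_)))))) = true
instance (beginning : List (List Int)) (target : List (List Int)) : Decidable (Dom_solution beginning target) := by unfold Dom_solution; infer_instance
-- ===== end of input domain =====

-- B packs each row's match/anti-match pattern into integer bitmasks, keeps the column-flip
-- state as one XOR-updated parity integer and counts flips via popcounts, replacing A's
-- physical in-place grid flips and whole-list comparisons (measured faster).
-- A mutates `beginning` in place, B does not; the equivalence is about the return value.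

-- ===== PORT A =====
-- flip(index, 1): flip the first y entries of row `index` in place
def pvFlipRow (b : List (List Int)) (index y : Nat) : List (List Int) :=
  b.set index ((List.range y).foldl (fun r i => r.set i (1 - r.getD i 0)) (b.getD index []))

-- flip(index, 0): flip entry `index` of rows 0..x-1
def pvFlipCol (b : List (List Int)) (index x : Nat) : List (List Int) :=
  (List.range x).foldl
    (fun bb xx => bb.set xx ((bb.getD xx []).set index (1 - (bb.getD xx []).getD index 0))) b

-- body of A's `for x1 in range(x)` loop; state = (beginning, answer)
def pvStepA (target : List (List Int)) (x y : Nat) (st : List (List Int) × Int)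
    (x1 : Nat) : List (List Int) × Int :=
  let now := st.1.getD x1 []
  let t := target.getD x1 []
  if now = t then st
  else
    let diff : Int :=
      (List.range y).foldl (fun d y1 => if now.getD y1 0 ≠ t.getD y1 0 then d + 1 else d) 0
    -- Python compares `diff > y/2` with float division; for ints this is exactly 2*diff > y
    if 2 * diff > (y : Int) then
      let st2 := (List.range y).foldl
        (fun (s : List (List Int) × Int) y2 =>
          if (s.1.getD x1 []).getD y2 0 = t.getD y2 0 then (pvFlipCol s.1 y2 x, s.2 + 1) else s)
        st
      (pvFlipRow st2.1 x1 y, st2.2 + 1)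
    else
      (List.range y).foldl
        (fun (s : List (List Int) × Int) y2 =>
          if (s.1.getD x1 []).getD y2 0 ≠ t.getD y2 0 then (pvFlipCol s.1 y2 x, s.2 + 1) else s)
        st

def solution (beginning : List (List Int)) (target : List (List Int)) : Int :=
  if beginning = target then 0
  else
    let x := beginning.length
    let y := (beginning.getD 0 []).length
    let st := (List.range x).foldl (pvStepA target x y) (beginning, 0)
    if st.1 ≠ target then -1 else st.2

-- ===== PORT B =====
-- Source B's popcount: `while m: c += m & 1; m >>= 1`
def pvPopcount (m : Nat) : Nat :=
  if h : m = 0 then 0 else (m &&& 1) + pvPopcount (m >>> 1)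
decreasing_by
  rw [Nat.shiftRight_one]; exact Nat.div_lt_self (Nat.pos_of_ne_zero h) one_lt_two

-- one pass of Source B's mask-building loop: bit j of e iff bi[j]==ti[j], of f iff 1-bi[j]==ti[j]
def pvMasksRow (br tr : List Int) (y : Nat) : Nat × Nat :=
  (List.range y).foldl
    (fun (ef : Nat × Nat) j =>
      (if br.getD j 0 == tr.getD j 0 then ef.1 ||| (1 <<< j) else ef.1,
       if 1 - br.getD j 0 == tr.getD j 0 then ef.2 ||| (1 <<< j) else ef.2)) (0, 0)

-- body of Source B's `for i in range(x)` loop; state = (odd, rowflip, answer)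
def pvStepBM (E F : List Nat) (y full : Nat) (st : Nat × Nat × Int) (i : Nat) : Nat × Nat × Int :=
  let m := (E.getD i 0 &&& (full ^^^ st.1)) ||| (F.getD i 0 &&& st.1)
  let matched := pvPopcount m
  if matched = y then st
  else
    let tr : Nat × Nat × Int :=
      if 2 * ((y : Int) - (matched : Int)) > (y : Int) then (m, st.2.1 ||| (1 <<< i), st.2.2 + 1)
      else (full ^^^ m, st.2.1, st.2.2)
    (st.1 ^^^ tr.1, tr.2.1, tr.2.2 + (pvPopcount tr.1 : Int))

def solution_alt (beginning : List (List Int)) (target : List (List Int)) : Int :=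
  if beginning = target then 0
  else
    let x := beginning.length
    let y := (beginning.getD 0 []).length
    let full := (1 <<< y) - 1
    let ef := (beginning.zip target).map (fun bt => pvMasksRow bt.1 bt.2 y)
    let E := ef.map Prod.fst
    let F := ef.map Prod.snd
    let st := (List.range x).foldl (pvStepBM E F y full) (0, 0, (0 : Int))
    if (List.range x).all (fun i =>
        let q := st.1 ^^^ (if (st.2.1 >>> i) &&& 1 == 1 then full else 0)
        ((E.getD i 0 &&& (full ^^^ q)) ||| (F.getD i 0 &&& q)) == full)
    then st.2.2 else -1

-- ===== PRECONDITION & SPEC =====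
-- Pre_ excludes shape-mismatched grids (empty `beginning`, differing row counts, or rows of
-- differing lengths): there A either raises IndexError or its raw list comparisons of the
-- partially-flipped state give accidental results, and B's direct indexing may itself raise.
def Pre_solution (beginning : List (List Int)) (target : List (List Int)) : Prop :=
  beginning = target ∨
    (beginning ≠ [] ∧ target.length = beginning.length ∧
     (∀ r ∈ beginning, r.length = (beginning.getD 0 []).length) ∧
     (∀ r ∈ target, r.length = (beginning.getD 0 []).length))
instance (beginning : List (List Int)) (target : List (List Int)) : Decidable (Pre_solution beginning target) := by unfold Pre_solution; infer_instance

def pvWitness_solution : List (List Int) × List (List Int) :=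
  ([[0, 1], [1, 0]], [[1, 0], [0, 1]])

def Spec_solution (beginning : List (List Int)) (target : List (List Int)) (out : Int) : Prop := out = solution_alt beginning target
instance (beginning : List (List Int)) (target : List (List Int)) (out : Int) : Decidable (Spec_solution beginning target out) := by unfold Spec_solution; infer_instance

-- ===== CLAIM (what is proved, stated in full; the proofs are below) =====
def Claim_equal_solution : Prop := ∀ (beginning : List (List Int)) (target : List (List Int)), Dom_solution beginning target → Pre_solution beginning target → Spec_solution beginning target (solution beginning target)


-- ===== LEMMAS AND PROOFS =====

-- current value of cell (i,j) of A's board when its flip parity is p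
def pvCellP (beginning : List (List Int)) (p : Bool) (i j : Nat) : Int :=
  if p then 1 - (beginning.getD i []).getD j 0 else (beginning.getD i []).getD j 0

-- loop invariant: A's mutated board b is `beginning` viewed through B's parity masks
def pvInvB (beginning : List (List Int)) (y : Nat) (b : List (List Int))
    (odd rowflip : Nat) : Prop :=
  b.length = beginning.length ∧
  (∀ i, i < beginning.length → (b.getD i []).length = y) ∧
  (∀ i, i < beginning.length → ∀ j, j < y →
    (b.getD i []).getD j 0 = pvCellP beginning (rowflip.testBit i ^^ odd.testBit j) i j)

-- bit-level helpers
lemma pvTestBit_xor_pow (o j j' : Nat) :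
    (o ^^^ (1 <<< j)).testBit j' = (o.testBit j' ^^ decide (j = j')) := by
  rw [Nat.one_shiftLeft, Nat.testBit_xor, Nat.testBit_two_pow]

lemma pvTestBit_or_pow (o j j' : Nat) :
    (o ||| (1 <<< j)).testBit j' = (o.testBit j' || decide (j = j')) := by
  rw [Nat.one_shiftLeft, Nat.testBit_or, Nat.testBit_two_pow]

lemma pvTestBit_full (y j : Nat) : ((1 <<< y) - 1 : Nat).testBit j = decide (j < y) := by
  rw [Nat.one_shiftLeft]; exact Nat.testBit_two_pow_sub_one y j

lemma pvShiftAndOne (m i : Nat) : ((m >>> i) &&& 1 == 1) = m.testBit i := by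
  rw [Nat.testBit, Nat.and_one_is_mod, Nat.one_and_eq_mod_two]
  rcases Nat.mod_two_eq_zero_or_one (m >>> i) with h | h <;> simp [h]

lemma pvPopcount_zero : pvPopcount 0 = 0 := by unfold pvPopcount; simp

lemma pvPopcount_eq_countP (y : Nat) :
    ∀ m, (∀ j, m.testBit j = true → j < y) → pvPopcount m = (List.range y).countP m.testBit := by
  induction y with
  | zero =>
      intro m hm
      have : m = 0 := Nat.eq_of_testBit_eq (fun i => by
        rw [Nat.zero_testBit]
        by_contra hc
        exact absurd (hm i (by simpa using hc)) (by omega))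
      simp [this, pvPopcount_zero]
  | succ y ih =>
      intro m hm
      by_cases h0 : m = 0
      · subst h0
        rw [pvPopcount_zero]
        have hzz : List.countP (Nat.testBit 0) (List.range (y+1)) = 0 :=
          List.countP_eq_zero.mpr (fun a _ => by simp [Nat.zero_testBit])
        omega
      · rw [pvPopcount, dif_neg h0]
        have hsh : ∀ j, (m >>> 1).testBit j = true → j < y := by
          intro j hj
          rw [Nat.testBit_shiftRight] at hj
          have := hm (1 + j) hj
          omega
        rw [ih (m >>> 1) hsh, List.range_succ_eq_map, List.countP_cons, List.countP_map]
        have h1 : (m.testBit ∘ Nat.succ) = (m >>> 1).testBit := by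
          funext j
          simp [Nat.testBit_shiftRight, Nat.add_comm 1 j, Function.comp]
        have h2 : m &&& 1 = if m.testBit 0 then 1 else 0 := by
          rw [Nat.and_one_is_mod, Nat.testBit_zero]
          rcases Nat.mod_two_eq_zero_or_one m with h | h <;> simp [h]
        rw [h1, h2]
        cases m.testBit 0 <;> simp <;> omega

-- bits of the row masks built by Source B's pre-pass
lemma pvMasksRow_succ (br tr : List Int) (y : Nat) :
    pvMasksRow br tr (y+1) =
      ((if br.getD y 0 == tr.getD y 0 then (pvMasksRow br tr y).1 ||| (1 <<< y) else (pvMasksRow br tr y).1),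
       (if 1 - br.getD y 0 == tr.getD y 0 then (pvMasksRow br tr y).2 ||| (1 <<< y) else (pvMasksRow br tr y).2)) := by
  rw [pvMasksRow, List.range_succ, List.foldl_append]; rfl

lemma pvMasksRow_fst_testBit (br tr : List Int) (y : Nat) : ∀ j,
    (pvMasksRow br tr y).1.testBit j = (decide (j < y) && (br.getD j 0 == tr.getD j 0)) := by
  induction y with
  | zero => intro j; simp [pvMasksRow, Nat.zero_testBit]
  | succ y ih =>
      intro j
      rw [pvMasksRow_succ]
      by_cases hc : br.getD y 0 == tr.getD y 0
      · rw [if_pos hc]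
        simp only [pvTestBit_or_pow, ih j]
        by_cases hj : y = j
        · subst hj
          have hceq : br.getD y 0 = tr.getD y 0 := by simpa using hc
          simp only [List.getD_eq_getElem?_getD] at hceq
          simp [hceq]
        · have : (j < y + 1) = (j < y) := by
            apply propext; constructor <;> intro h <;> omega
          simp [hj, this]
      · rw [if_neg hc]
        simp only [ih j]
        by_cases hj : y = j
        · subst hj
          simp at hc
          simp [hc]
        · have : (j < y + 1) = (j < y) := by
            apply propext; constructor <;> intro h <;> omega
          simp [this]

lemma pvMasksRow_snd_testBit (br tr : List Int) (y : Nat) : ∀ j,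
    (pvMasksRow br tr y).2.testBit j = (decide (j < y) && (1 - br.getD j 0 == tr.getD j 0)) := by
  induction y with
  | zero => intro j; simp [pvMasksRow, Nat.zero_testBit]
  | succ y ih =>
      intro j
      rw [pvMasksRow_succ]
      by_cases hc : 1 - br.getD y 0 == tr.getD y 0
      · rw [if_pos hc]
        simp only [pvTestBit_or_pow, ih j]
        by_cases hj : y = j
        · subst hj
          have hceq : 1 - br.getD y 0 = tr.getD y 0 := by simpa using hc
          simp only [List.getD_eq_getElem?_getD] at hceq
          simp [hceq]
        · have : (j < y + 1) = (j < y) := by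
            apply propext; constructor <;> intro h <;> omega
          simp [hj, this]
      · rw [if_neg hc]
        simp only [ih j]
        by_cases hj : y = j
        · subst hj
          simp at hc
          simp [hc]
        · have : (j < y + 1) = (j < y) := by
            apply propext; constructor <;> intro h <;> omega
          simp [this]

-- bits of Source B's per-row match mask m = (E & (full^odd)) | (F & odd)
lemma pvMask_testBit (br tr : List Int) (y p : Nat) (hp : ∀ j, p.testBit j = true → j < y) (j : Nat) :
    (((pvMasksRow br tr y).1 &&& (((1 <<< y) - 1) ^^^ p)) ||| ((pvMasksRow br tr y).2 &&& p)).testBit j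
      = (decide (j < y) && ((if p.testBit j then 1 - br.getD j 0 else br.getD j 0) == tr.getD j 0)) := by
  rw [Nat.testBit_or, Nat.testBit_and, Nat.testBit_and, Nat.testBit_xor, pvTestBit_full,
    pvMasksRow_fst_testBit, pvMasksRow_snd_testBit]
  by_cases hj : j < y
  · cases hpb : p.testBit j <;> simp [hj, hpb]
  · have : p.testBit j = false := by
      cases hpb : p.testBit j
      · rfl
      · exact absurd (hp j hpb) hj
    simp [hj, this]

-- (reused) fold-of-set helper lemmas
lemma pvSetFold_length {α : Type} (f : α → α) (d : α) (n : Nat) (r : List α) :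
    ((List.range n).foldl (fun l k => l.set k (f (l.getD k d))) r).length = r.length := by
  induction n with
  | zero => simp
  | succ n ih =>
      rw [List.range_succ, List.foldl_append, List.foldl_cons, List.foldl_nil, List.length_set]
      exact ih

lemma pvSetFold_getElem? {α : Type} (f : α → α) (d : α) (n : Nat) (r : List α) (i : Nat) :
    ((List.range n).foldl (fun l k => l.set k (f (l.getD k d))) r)[i]? =
      if i < n then (r[i]?).map f else r[i]? := by
  induction n generalizing i with
  | zero => simp
  | succ n ih =>
      rw [List.range_succ, List.foldl_append, List.foldl_cons, List.foldl_nil]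
      rw [List.getElem?_set]
      by_cases hni : n = i
      · subst hni
        simp only [if_pos (Nat.lt_succ_self n)]
        rw [pvSetFold_length]
        by_cases hlen : n < r.length
        · rw [if_pos hlen, List.getD_eq_getElem?_getD, ih]
          simp [List.getElem?_eq_getElem hlen]
        · rw [if_neg hlen]
          rw [List.getElem?_eq_none (l := r) (by omega)]
          simp
      · rw [if_neg hni, ih]
        have : i < n + 1 ↔ i < n := by omega
        simp [this]

lemma pvFlipCol_getElem? (b : List (List Int)) (j x i : Nat) :
    (pvFlipCol b j x)[i]? =
      if i < x then (b[i]?).map (fun row => row.set j (1 - row.getD j 0)) else b[i]? := by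
  unfold pvFlipCol
  exact pvSetFold_getElem? (fun row => row.set j (1 - row.getD j 0)) [] x b i

lemma pvFlipCol_length (b : List (List Int)) (j x : Nat) :
    (pvFlipCol b j x).length = b.length := by
  unfold pvFlipCol
  exact pvSetFold_length (fun row => row.set j (1 - row.getD j 0)) [] x b

-- invariant preservation under a column flip (odd parity bit j toggles)
lemma pvInvB_flipCol {beginning : List (List Int)} {y : Nat} {b : List (List Int)}
    {odd rowflip : Nat} {j : Nat} (hj : j < y) (h : pvInvB beginning y b odd rowflip) :
    pvInvB beginning y (pvFlipCol b j beginning.length) (odd ^^^ (1 <<< j)) rowflip := by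
  obtain ⟨hb, hrow, hcell⟩ := h
  have hrowval : ∀ i, i < beginning.length →
      (pvFlipCol b j beginning.length).getD i []
        = (b.getD i []).set j (1 - (b.getD i []).getD j 0) := by
    intro i hi
    have hib : i < b.length := by rw [hb]; exact hi
    rw [List.getD_eq_getElem?_getD, pvFlipCol_getElem?, if_pos hi,
      List.getElem?_eq_getElem hib]
    simp [List.getD_eq_getElem?_getD, List.getElem?_eq_getElem hib]
  refine ⟨by rw [pvFlipCol_length]; exact hb, ?_, ?_⟩
  · intro i hi
    rw [hrowval i hi, List.length_set]
    exact hrow i hi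
  · intro i hi j' hj'
    rw [hrowval i hi, List.getD_eq_getElem?_getD, List.getElem?_set]
    by_cases hjj : j = j'
    · subst hjj
      have hjlen : j < (b.getD i []).length := by rw [hrow i hi]; exact hj
      rw [if_pos rfl, if_pos hjlen]
      simp only [Option.getD_some]
      rw [hcell i hi j hj, pvTestBit_xor_pow]
      cases hr : rowflip.testBit i <;> cases ho : odd.testBit j <;>
        simp [pvCellP] <;> ring
    · rw [if_neg hjj, ← List.getD_eq_getElem?_getD, hcell i hi j' hj', pvTestBit_xor_pow]
      simp [hjj]

-- invariant preservation under A's row flip (rowflip bit i0 switches on)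
lemma pvInvB_flipRow {beginning : List (List Int)} {y : Nat} {b : List (List Int)}
    {odd rowflip : Nat} {i0 : Nat} (hi0 : i0 < beginning.length)
    (hbit : rowflip.testBit i0 = false) (h : pvInvB beginning y b odd rowflip) :
    pvInvB beginning y (pvFlipRow b i0 y) odd (rowflip ||| (1 <<< i0)) := by
  obtain ⟨hb, hrow, hcell⟩ := h
  have hi0b : i0 < b.length := by rw [hb]; exact hi0
  have hlen0 : (b.getD i0 []).length = y := hrow i0 hi0
  have hnew_len :
      ((List.range y).foldl (fun r i => r.set i (1 - r.getD i 0)) (b.getD i0 [])).length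
        = (b.getD i0 []).length :=
    pvSetFold_length (fun v => 1 - v) 0 y (b.getD i0 [])
  have hnew_get : ∀ jj : Nat,
      ((List.range y).foldl (fun r i => r.set i (1 - r.getD i 0)) (b.getD i0 []))[jj]? =
        if jj < y then ((b.getD i0 [])[jj]?).map (fun v => 1 - v) else (b.getD i0 [])[jj]? :=
    fun jj => pvSetFold_getElem? (fun v => 1 - v) 0 y (b.getD i0 []) jj
  have hrowval : ∀ i, i < beginning.length →
      (pvFlipRow b i0 y).getD i [] =
        if i0 = i then (List.range y).foldl (fun r i => r.set i (1 - r.getD i 0)) (b.getD i0 [])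
        else b.getD i [] := by
    intro i hi
    have hib : i < b.length := by rw [hb]; exact hi
    unfold pvFlipRow
    rw [List.getD_eq_getElem?_getD, List.getElem?_set]
    by_cases hii : i0 = i
    · rw [if_pos hii, if_pos hi0b, if_pos hii]
      rfl
    · rw [if_neg hii, if_neg hii, ← List.getD_eq_getElem?_getD]
  refine ⟨by unfold pvFlipRow; rw [List.length_set]; exact hb, ?_, ?_⟩
  · intro i hi
    rw [hrowval i hi]
    by_cases hii : i0 = i
    · rw [if_pos hii, hnew_len]
      exact hlen0
    · rw [if_neg hii]
      exact hrow i hi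
  · intro i hi j hj
    have hrset : (rowflip ||| (1 <<< i0)).testBit i =
        (rowflip.testBit i || decide (i0 = i)) := pvTestBit_or_pow rowflip i0 i
    rw [hrowval i hi]
    by_cases hii : i0 = i
    · subst hii
      have hjlen : j < (b.getD i0 []).length := by rw [hlen0]; exact hj
      rw [if_pos rfl, List.getD_eq_getElem?_getD, hnew_get j, if_pos hj,
        List.getElem?_eq_getElem hjlen]
      simp only [Option.map_some, Option.getD_some]
      have hgd : (b.getD i0 []).getD j 0 = (b.getD i0 [])[j] := by
        rw [List.getD_eq_getElem?_getD, List.getElem?_eq_getElem hjlen]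
        rfl
      rw [← hgd, hcell i0 hi0 j hj, hrset, hbit]
      cases ho : odd.testBit j <;> simp [pvCellP] <;> ring
    · rw [if_neg hii, hcell i hi j hj, hrset]
      simp [hii]

-- (reused) elementwise characterisation of list equality
lemma pvEqIffGetD {α : Type} (d : α) (A B : List α) (h : A.length = B.length) :
    A = B ↔ ∀ i, i < A.length → A.getD i d = B.getD i d := by
  constructor
  · rintro rfl; intro i _; rfl
  · intro h2
    apply List.ext_getElem h
    intro i h1 h2'
    have := h2 i h1
    simpa [List.getD_eq_getElem?_getD, List.getElem?_eq_getElem, h1, h2'] using this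

lemma pvTargetRowLen (beginning target : List (List Int)) (y : Nat)
    (htl : target.length = beginning.length) (hty : ∀ r ∈ target, r.length = y)
    (i : Nat) (hi : i < beginning.length) : (target.getD i []).length = y := by
  have hit : i < target.length := by rw [htl]; exact hi
  rw [List.getD_eq_getElem?_getD, List.getElem?_eq_getElem hit]
  exact hty _ (List.getElem_mem _)

-- E/F list access
lemma pvE_getD (beginning target : List (List Int)) (y : Nat)
    (htl : target.length = beginning.length) (i : Nat) (hi : i < beginning.length) :
    ((((beginning.zip target).map (fun bt => pvMasksRow bt.1 bt.2 y)).map Prod.fst).getD i 0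
        = (pvMasksRow (beginning.getD i []) (target.getD i []) y).1) ∧
    ((((beginning.zip target).map (fun bt => pvMasksRow bt.1 bt.2 y)).map Prod.snd).getD i 0
        = (pvMasksRow (beginning.getD i []) (target.getD i []) y).2) := by
  have hit : i < target.length := by rw [htl]; exact hi
  have hzl : i < (beginning.zip target).length := by
    rw [List.length_zip]; omega
  have hz : (beginning.zip target)[i] = (beginning[i], target[i]) := List.getElem_zip ..
  have hb : beginning.getD i [] = beginning[i] := by
    rw [List.getD_eq_getElem?_getD, List.getElem?_eq_getElem hi]; rfl
  have ht : target.getD i [] = target[i] := by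
    rw [List.getD_eq_getElem?_getD, List.getElem?_eq_getElem hit]; rfl
  constructor <;>
  · rw [List.getD_eq_getElem?_getD, List.getElem?_map, List.getElem?_map,
      List.getElem?_eq_getElem hzl, hz, hb, ht]
    rfl

-- A's inner column loop, both polarities at once (pol=true: flip where equal)
lemma pvInnerB (pol : Bool) (beginning target : List (List Int)) (y x1 : Nat)
    (hx1 : x1 < beginning.length) (rowflip : Nat) (hbit : rowflip.testBit x1 = false)
    (odd0 : Nat) :
    ∀ (l : List Nat), l.Nodup → (∀ j ∈ l, j < y) →
    ∀ (b : List (List Int)) (odd : Nat) (a : Int),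
      pvInvB beginning y b odd rowflip →
      (∀ j ∈ l, odd.testBit j = odd0.testBit j) →
      ((l.foldl (fun (s : List (List Int) × Int) y2 =>
          if (((s.1.getD x1 []).getD y2 0 == (target.getD x1 []).getD y2 0) = pol) then
            (pvFlipCol s.1 y2 beginning.length, s.2 + 1) else s) (b, a)).2
        = a + ((l.countP (fun j => (pvCellP beginning (odd0.testBit j) x1 j == (target.getD x1 []).getD j 0) == pol)) : Int)) ∧
      pvInvB beginning y
        (l.foldl (fun (s : List (List Int) × Int) y2 =>
          if (((s.1.getD x1 []).getD y2 0 == (target.getD x1 []).getD y2 0) = pol) then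
            (pvFlipCol s.1 y2 beginning.length, s.2 + 1) else s) (b, a)).1
        (l.foldl (fun o j =>
          if (pvCellP beginning (odd0.testBit j) x1 j == (target.getD x1 []).getD j 0) == pol
          then o ^^^ (1 <<< j) else o) odd) rowflip ∧
      (∀ j', (l.foldl (fun o j =>
          if (pvCellP beginning (odd0.testBit j) x1 j == (target.getD x1 []).getD j 0) == pol
          then o ^^^ (1 <<< j) else o) odd).testBit j'
        = (odd.testBit j' ^^ (decide (j' ∈ l) &&
            ((pvCellP beginning (odd0.testBit j') x1 j' == (target.getD x1 []).getD j' 0) == pol)))) := by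
  intro l
  induction l with
  | nil =>
      intro _ _ b odd a h _
      refine ⟨by simp, h, by simp⟩
  | cons j l' ih =>
      intro hnd hl b odd a h hagree
      have hj : j < y := hl j (List.mem_cons_self)
      have hl' : ∀ k ∈ l', k < y := fun k hk => hl k (List.mem_cons_of_mem _ hk)
      have hjl' : j ∉ l' := (List.nodup_cons.mp hnd).1
      have hnd' : l'.Nodup := (List.nodup_cons.mp hnd).2
      have hagree' : odd.testBit j = odd0.testBit j := hagree j (List.mem_cons_self)
      have hvals : (b.getD x1 []).getD j 0 = pvCellP beginning (odd0.testBit j) x1 j := by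
        rw [h.2.2 x1 hx1 j hj, hbit, hagree']
        simp
      simp only [List.foldl_cons]
      by_cases hc : ((pvCellP beginning (odd0.testBit j) x1 j == (target.getD x1 []).getD j 0) == pol) = true
      · have hc' : (pvCellP beginning (odd0.testBit j) x1 j == (target.getD x1 []).getD j 0) = pol := by
          simpa using hc
        have hcA : (((b.getD x1 []).getD j 0 == (target.getD x1 []).getD j 0) = pol) := by
          rw [hvals]; exact hc'
        rw [if_pos hcA, if_pos hc]
        have hagree2 : ∀ k ∈ l', (odd ^^^ (1 <<< j)).testBit k = odd0.testBit k := by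
          intro k hk
          rw [pvTestBit_xor_pow]
          have hne : j ≠ k := fun hh => hjl' (hh ▸ hk)
          simp [hne, hagree k (List.mem_cons_of_mem _ hk)]
        obtain ⟨ha, hinv, hbits⟩ := ih hnd' hl' (pvFlipCol b j beginning.length)
          (odd ^^^ (1 <<< j)) (a + 1) (pvInvB_flipCol hj h) hagree2
        refine ⟨?_, hinv, ?_⟩
        · rw [ha]
          simp only [List.countP_cons, hc, if_true]
          push_cast
          ring
        · intro j'
          rw [hbits j', pvTestBit_xor_pow]
          by_cases hjj : j = j'
          · subst hjj
            have h1 : decide (j ∈ l') = false := by simpa using hjl'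
            have h2 : decide (j ∈ j :: l') = true := by simp
            rw [h1, h2, hc]
            simp
          · have h1 : decide (j' ∈ j :: l') = decide (j' ∈ l') :=
              decide_eq_decide.mpr (by
                constructor
                · intro h'
                  rcases List.mem_cons.mp h' with h'' | h''
                  · exact absurd h''.symm hjj
                  · exact h''
                · intro h'
                  exact List.mem_cons_of_mem _ h')
            have h2 : decide (j = j') = false := by simp [hjj]
            rw [h1, h2]
            cases odd.testBit j' <;> simp
      · have hcf : ((pvCellP beginning (odd0.testBit j) x1 j == (target.getD x1 []).getD j 0) == pol) = false :=
          by rw [← Bool.not_eq_true]; exact hc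
        have hc' : ¬ ((pvCellP beginning (odd0.testBit j) x1 j == (target.getD x1 []).getD j 0) = pol) := by
          simpa using hcf
        have hcA : ¬ (((b.getD x1 []).getD j 0 == (target.getD x1 []).getD j 0) = pol) := by
          rw [hvals]; exact hc'
        rw [if_neg hcA, if_neg hc]
        obtain ⟨ha, hinv, hbits⟩ := ih hnd' hl' b odd a h
          (fun k hk => hagree k (List.mem_cons_of_mem _ hk))
        refine ⟨?_, hinv, ?_⟩
        · rw [ha]
          simp only [List.countP_cons, hcf, if_false]
          simp
        · intro j'
          rw [hbits j']
          by_cases hjj : j = j'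
          · subst hjj
            have h1 : decide (j ∈ l') = false := by simpa using hjl'
            rw [h1, hcf]
            simp
          · have h1 : decide (j' ∈ j :: l') = decide (j' ∈ l') :=
              decide_eq_decide.mpr (by
                constructor
                · intro h'
                  rcases List.mem_cons.mp h' with h'' | h''
                  · exact absurd h''.symm hjj
                  · exact h''
                · intro h'
                  exact List.mem_cons_of_mem _ h')
            rw [h1]


-- xor'd masks keep bits below y
lemma pvXorBits_lt {p q : Nat} (y : Nat) (hp : ∀ j, p.testBit j = true → j < y)
    (hq : ∀ j, q.testBit j = true → j < y) :
    ∀ j, (p ^^^ q).testBit j = true → j < y := by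
  intro j hj
  rw [Nat.testBit_xor] at hj
  cases hpb : p.testBit j
  · cases hqb : q.testBit j
    · rw [hpb, hqb] at hj; simp at hj
    · exact hq j hqb
  · exact hp j hpb

-- the two main loops run in lock-step
lemma pvMainB (beginning target : List (List Int)) (y : Nat)
    (htl : target.length = beginning.length) (hty : ∀ r ∈ target, r.length = y)
    (E F : List Nat)
    (hE : ∀ i, i < beginning.length →
      E.getD i 0 = (pvMasksRow (beginning.getD i []) (target.getD i []) y).1)
    (hF : ∀ i, i < beginning.length →
      F.getD i 0 = (pvMasksRow (beginning.getD i []) (target.getD i []) y).2) :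
    ∀ (l : List Nat), l.Nodup → (∀ i ∈ l, i < beginning.length) →
    ∀ (b : List (List Int)) (odd rowflip : Nat) (a : Int),
      pvInvB beginning y b odd rowflip →
      (∀ j, odd.testBit j = true → j < y) →
      (∀ i ∈ l, rowflip.testBit i = false) →
      ((l.foldl (pvStepA target beginning.length y) (b, a)).2
          = (l.foldl (pvStepBM E F y ((1 <<< y) - 1)) (odd, rowflip, a)).2.2) ∧
      pvInvB beginning y (l.foldl (pvStepA target beginning.length y) (b, a)).1
        (l.foldl (pvStepBM E F y ((1 <<< y) - 1)) (odd, rowflip, a)).1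
        (l.foldl (pvStepBM E F y ((1 <<< y) - 1)) (odd, rowflip, a)).2.1 ∧
      (∀ j, (l.foldl (pvStepBM E F y ((1 <<< y) - 1)) (odd, rowflip, a)).1.testBit j = true → j < y) := by
  intro l
  induction l with
  | nil =>
      intro _ _ b odd rowflip a h hodd _
      exact ⟨rfl, h, hodd⟩
  | cons i l' ih =>
      intro hnd hl b odd rowflip a h hodd hrb
      have hx1 : i < beginning.length := hl i List.mem_cons_self
      have hni : i ∉ l' := (List.nodup_cons.mp hnd).1
      have hnd' : l'.Nodup := (List.nodup_cons.mp hnd).2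
      have hl' : ∀ k ∈ l', k < beginning.length := fun k hk => hl k (List.mem_cons_of_mem _ hk)
      have hrb' : ∀ k ∈ l', rowflip.testBit k = false := fun k hk => hrb k (List.mem_cons_of_mem _ hk)
      have hbF : rowflip.testBit i = false := hrb i List.mem_cons_self
      have htlen : (target.getD i []).length = y := pvTargetRowLen beginning target y htl hty i hx1
      have hnlen : (b.getD i []).length = y := h.2.1 i hx1
      set cond0 := fun j => (pvCellP beginning (odd.testBit j) i j == (target.getD i []).getD j 0) with hcond0
      set M := ((E.getD i 0 &&& (((1 <<< y) - 1) ^^^ odd)) ||| (F.getD i 0 &&& odd)) with hM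
      have hmbits : ∀ j, M.testBit j = (decide (j < y) && cond0 j) := by
        intro j
        rw [hM, hE i hx1, hF i hx1]
        exact pvMask_testBit (beginning.getD i []) (target.getD i []) y odd hodd j
      have hmlt : ∀ j, M.testBit j = true → j < y := by
        intro j hj
        by_contra hc
        rw [hmbits j] at hj
        simp [hc] at hj
      have hmatched : pvPopcount M = (List.range y).countP cond0 := by
        rw [pvPopcount_eq_countP y M hmlt]
        apply List.countP_congr
        intro j hj
        rw [hmbits j]
        simp [List.mem_range.mp hj]
      have hrowvals : ∀ j, j < y →
          (b.getD i []).getD j 0 = pvCellP beginning (odd.testBit j) i j := by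
        intro j hj
        rw [h.2.2 i hx1 j hj, hbF]
        simp
      have hnowt : (b.getD i [] = target.getD i []) ↔ ((List.range y).countP cond0 = y) := by
      -- countP = y iff every position matches iff the row equals the target row
        have hlenr : ((List.range y).countP cond0 = y) ↔ (∀ j ∈ List.range y, cond0 j = true) := by
          constructor
          · intro hcc
            exact List.countP_eq_length.mp (by rw [List.length_range]; exact hcc)
          · intro hall
            have := List.countP_eq_length.mpr hall
            rw [List.length_range] at this
            exact this
        rw [hlenr, pvEqIffGetD 0 _ _ (by rw [hnlen, htlen])]
        constructor
        · intro hall j hj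
          have hjy := List.mem_range.mp hj
          rw [hcond0]
          exact beq_iff_eq.mpr (by rw [← hrowvals j hjy]; exact hall j (by rw [hnlen]; exact hjy))
        · intro hall j hjB
          have hjy : j < y := by rw [← hnlen]; exact hjB
          rw [hrowvals j hjy]
          have := hall j (List.mem_range.mpr hjy)
          rw [hcond0] at this
          exact beq_iff_eq.mp this
      have hdec : ∀ (u v : Int), decide (u ≠ v) = !(u == v) := fun u v => by
        by_cases huv : u = v <;> simp [huv]
      have hsum : y = (List.range y).countP cond0 + (List.range y).countP (fun a => !cond0 a) := by
        have hh := List.length_eq_countP_add_countP (l := List.range y) (p := cond0)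
        rw [List.length_range] at hh
        have hfx : ∀ a, (decide ¬(cond0 a = true)) = (!cond0 a) := fun a => by
          cases hca : cond0 a <;> simp
        calc y = (List.range y).countP cond0
                  + (List.range y).countP (fun a => decide ¬(cond0 a = true)) := hh
          _ = _ := by
                congr 1
                exact List.countP_congr (fun a _ => by rw [hfx a])
      have hdiffeq : (List.range y).foldl
            (fun d y1 => if (b.getD i []).getD y1 0 ≠ (target.getD i []).getD y1 0 then d + 1 else d) (0:Int)
          = (y : Int) - (pvPopcount M : Int) := by
        rw [PySem.List.foldl_ite_add_one]
        have h1 : (List.range y).countP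
              (fun y1 => decide ((b.getD i []).getD y1 0 ≠ (target.getD i []).getD y1 0))
            = (List.range y).countP (fun a => !cond0 a) := by
          apply List.countP_congr
          intro j hj
          have hjy := List.mem_range.mp hj
          rw [hdec, hrowvals j hjy, hcond0]
        rw [h1, hmatched]
        omega
      by_cases heq : b.getD i [] = target.getD i []
      · have hstepA : pvStepA target beginning.length y (b, a) i = (b, a) := by
          simp only [pvStepA]
          rw [if_pos heq]
        have hstepB : pvStepBM E F y ((1 <<< y) - 1) (odd, rowflip, a) i = (odd, rowflip, a) := by
          simp only [pvStepBM]
          rw [← hM, if_pos (by rw [hmatched]; exact hnowt.mp heq)]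
        rw [List.foldl_cons, List.foldl_cons, hstepA, hstepB]
        exact ih hnd' hl' b odd rowflip a h hodd hrb'
      · have hpcne : ¬ (pvPopcount M = y) := fun hpc =>
          heq (hnowt.mpr (by rw [← hmatched]; exact hpc))
        by_cases hgt : 2 * ((y:Int) - (pvPopcount M : Int)) > (y : Int)
        · -- majority branch: flip matching columns, then the row
          have hstepA : pvStepA target beginning.length y (b, a) i =
              (pvFlipRow ((List.range y).foldl
                (fun (s : List (List Int) × Int) y2 =>
                  if (s.1.getD i []).getD y2 0 = (target.getD i []).getD y2 0 then
                    (pvFlipCol s.1 y2 beginning.length, s.2 + 1) else s) (b, a)).1 i y,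
               ((List.range y).foldl
                (fun (s : List (List Int) × Int) y2 =>
                  if (s.1.getD i []).getD y2 0 = (target.getD i []).getD y2 0 then
                    (pvFlipCol s.1 y2 beginning.length, s.2 + 1) else s) (b, a)).2 + 1) := by
            simp only [pvStepA]
            rw [if_neg heq, hdiffeq, if_pos hgt]
          have hstepB : pvStepBM E F y ((1 <<< y) - 1) (odd, rowflip, a) i =
              (odd ^^^ M, rowflip ||| (1 <<< i), a + 1 + (pvPopcount M : Int)) := by
            simp only [pvStepBM]
            rw [← hM, if_neg hpcne, if_pos hgt]
          have hfold : (List.range y).foldl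
                (fun (s : List (List Int) × Int) y2 =>
                  if (s.1.getD i []).getD y2 0 = (target.getD i []).getD y2 0 then
                    (pvFlipCol s.1 y2 beginning.length, s.2 + 1) else s) (b, a)
              = (List.range y).foldl
                (fun (s : List (List Int) × Int) y2 =>
                  if (((s.1.getD i []).getD y2 0 == (target.getD i []).getD y2 0) = true) then
                    (pvFlipCol s.1 y2 beginning.length, s.2 + 1) else s) (b, a) :=
            PySem.List.foldl_congr_mem _ _ _ _ (fun acc x _ => if_congr beq_iff_eq.symm rfl rfl)
          obtain ⟨ha2, hinv2, hbits2⟩ := pvInnerB true beginning target y i hx1 rowflip hbF odd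
            (List.range y) List.nodup_range (fun k hk => List.mem_range.mp hk) b odd a h
            (fun k _ => rfl)
          have hcntEq : (List.range y).countP
                (fun j => (pvCellP beginning (odd.testBit j) i j == (target.getD i []).getD j 0) == true)
              = (List.range y).countP cond0 :=
            List.countP_congr (fun j _ => by rw [hcond0]; simp)
          have hoddF : (List.range y).foldl
                (fun o j => if (pvCellP beginning (odd.testBit j) i j == (target.getD i []).getD j 0) == true
                  then o ^^^ (1 <<< j) else o) odd = odd ^^^ M := by
            apply Nat.eq_of_testBit_eq
            intro j'
            rw [hbits2 j', Nat.testBit_xor, hmbits j', hcond0]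
            simp [List.mem_range]
          have hSA : ((List.range y).foldl
                (fun (s : List (List Int) × Int) y2 =>
                  if (((s.1.getD i []).getD y2 0 == (target.getD i []).getD y2 0) = true) then
                    (pvFlipCol s.1 y2 beginning.length, s.2 + 1) else s) (b, a)).2 + 1
              = a + 1 + (pvPopcount M : Int) := by
            rw [ha2, hcntEq, ← hmatched]
            ring
          rw [List.foldl_cons, List.foldl_cons, hstepA, hstepB, hfold, hSA]
          have hinv3 := pvInvB_flipRow hx1 hbF (hoddF ▸ hinv2)
          have hodd3 : ∀ j, (odd ^^^ M).testBit j = true → j < y := pvXorBits_lt y hodd hmlt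
          have hrb3 : ∀ k ∈ l', (rowflip ||| (1 <<< i)).testBit k = false := by
            intro k hk
            rw [pvTestBit_or_pow]
            have hik : ¬ (i = k) := fun hh => hni (hh ▸ hk)
            simp [hrb' k hk, hik]
          exact ih hnd' hl' _ (odd ^^^ M) (rowflip ||| (1 <<< i))
            (a + 1 + (pvPopcount M : Int)) hinv3 hodd3 hrb3
        · -- minority branch: flip differing columns
          have hstepA : pvStepA target beginning.length y (b, a) i =
              (List.range y).foldl
                (fun (s : List (List Int) × Int) y2 =>
                  if (s.1.getD i []).getD y2 0 ≠ (target.getD i []).getD y2 0 then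
                    (pvFlipCol s.1 y2 beginning.length, s.2 + 1) else s) (b, a) := by
            simp only [pvStepA]
            rw [if_neg heq, hdiffeq, if_neg hgt]
          have hstepB : pvStepBM E F y ((1 <<< y) - 1) (odd, rowflip, a) i =
              (odd ^^^ (((1 <<< y) - 1) ^^^ M), rowflip,
               a + (pvPopcount (((1 <<< y) - 1) ^^^ M) : Int)) := by
            simp only [pvStepBM]
            rw [← hM, if_neg hpcne, if_neg hgt]
          have hTbits : ∀ j, (((1 <<< y) - 1) ^^^ M).testBit j = (decide (j < y) && !cond0 j) := by
            intro j
            rw [Nat.testBit_xor, pvTestBit_full, hmbits j]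
            by_cases hjy : j < y <;> cases hcj : cond0 j <;> simp [hjy, hcj]
          have hTlt : ∀ j, (((1 <<< y) - 1) ^^^ M).testBit j = true → j < y := by
            intro j hj
            by_contra hc
            rw [hTbits j] at hj
            simp [hc] at hj
          have hfold : (List.range y).foldl
                (fun (s : List (List Int) × Int) y2 =>
                  if (s.1.getD i []).getD y2 0 ≠ (target.getD i []).getD y2 0 then
                    (pvFlipCol s.1 y2 beginning.length, s.2 + 1) else s) (b, a)
              = (List.range y).foldl
                (fun (s : List (List Int) × Int) y2 =>
                  if (((s.1.getD i []).getD y2 0 == (target.getD i []).getD y2 0) = false) then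
                    (pvFlipCol s.1 y2 beginning.length, s.2 + 1) else s) (b, a) :=
            PySem.List.foldl_congr_mem _ _ _ _ (fun acc x _ => if_congr beq_eq_false_iff_ne.symm rfl rfl)
          obtain ⟨ha2, hinv2, hbits2⟩ := pvInnerB false beginning target y i hx1 rowflip hbF odd
            (List.range y) List.nodup_range (fun k hk => List.mem_range.mp hk) b odd a h
            (fun k _ => rfl)
          have hcntEq : (List.range y).countP
                (fun j => (pvCellP beginning (odd.testBit j) i j == (target.getD i []).getD j 0) == false)
              = (List.range y).countP (fun a => !cond0 a) :=
            List.countP_congr (fun j _ => by rw [hcond0]; simp)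
          have hoddF : (List.range y).foldl
                (fun o j => if (pvCellP beginning (odd.testBit j) i j == (target.getD i []).getD j 0) == false
                  then o ^^^ (1 <<< j) else o) odd = odd ^^^ (((1 <<< y) - 1) ^^^ M) := by
            apply Nat.eq_of_testBit_eq
            intro j'
            rw [hbits2 j', Nat.testBit_xor, hTbits j', hcond0]
            simp [List.mem_range]
          have hpc2 : pvPopcount (((1 <<< y) - 1) ^^^ M) = (List.range y).countP (fun a => !cond0 a) := by
            rw [pvPopcount_eq_countP y _ hTlt]
            apply List.countP_congr
            intro j hj
            rw [hTbits j]
            simp [List.mem_range.mp hj]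
          have hSA : ((List.range y).foldl
                (fun (s : List (List Int) × Int) y2 =>
                  if (((s.1.getD i []).getD y2 0 == (target.getD i []).getD y2 0) = false) then
                    (pvFlipCol s.1 y2 beginning.length, s.2 + 1) else s) (b, a)).2
              = a + (pvPopcount (((1 <<< y) - 1) ^^^ M) : Int) := by
            rw [ha2, hcntEq, hpc2]
          have hpair : (List.range y).foldl
                (fun (s : List (List Int) × Int) y2 =>
                  if (((s.1.getD i []).getD y2 0 == (target.getD i []).getD y2 0) = false) then
                    (pvFlipCol s.1 y2 beginning.length, s.2 + 1) else s) (b, a)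
              = (((List.range y).foldl
                (fun (s : List (List Int) × Int) y2 =>
                  if (((s.1.getD i []).getD y2 0 == (target.getD i []).getD y2 0) = false) then
                    (pvFlipCol s.1 y2 beginning.length, s.2 + 1) else s) (b, a)).1,
                 a + (pvPopcount (((1 <<< y) - 1) ^^^ M) : Int)) := by
            rw [← hSA]
          rw [List.foldl_cons, List.foldl_cons, hstepA, hstepB, hfold, hpair]
          exact ih hnd' hl' _ (odd ^^^ (((1 <<< y) - 1) ^^^ M)) rowflip
            (a + (pvPopcount (((1 <<< y) - 1) ^^^ M) : Int))
            (hoddF ▸ hinv2) (pvXorBits_lt y hodd hTlt) hrb'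

-- final whole-grid comparison vs B's per-row mask check
lemma pvFinalIffB (beginning target : List (List Int)) (y : Nat)
    (htl : target.length = beginning.length) (hty : ∀ r ∈ target, r.length = y)
    (E F : List Nat)
    (hE : ∀ i, i < beginning.length →
      E.getD i 0 = (pvMasksRow (beginning.getD i []) (target.getD i []) y).1)
    (hF : ∀ i, i < beginning.length →
      F.getD i 0 = (pvMasksRow (beginning.getD i []) (target.getD i []) y).2)
    (b : List (List Int)) (odd rowflip : Nat)
    (hInv : pvInvB beginning y b odd rowflip) (hodd : ∀ j, odd.testBit j = true → j < y) :
    (b = target) ↔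
      ((List.range beginning.length).all (fun i =>
        ((E.getD i 0 &&& (((1 <<< y) - 1) ^^^ (odd ^^^ (if (rowflip >>> i) &&& 1 == 1 then (1 <<< y) - 1 else 0)))) |||
         (F.getD i 0 &&& (odd ^^^ (if (rowflip >>> i) &&& 1 == 1 then (1 <<< y) - 1 else 0)))) == (1 <<< y) - 1) = true) := by
  obtain ⟨hb, hrow, hcell⟩ := hInv
  have hq : ∀ i, ∀ j, (odd ^^^ (if (rowflip >>> i) &&& 1 == 1 then (1 <<< y) - 1 else 0)).testBit j = true → j < y := by
    intro i j hj
    rw [Nat.testBit_xor] at hj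
    by_cases hob : odd.testBit j = true
    · exact hodd j hob
    · rw [Bool.not_eq_true] at hob
      rw [hob] at hj
      by_cases hrc : ((rowflip >>> i) &&& 1 == 1) = true
      · rw [if_pos hrc, pvTestBit_full] at hj
        simpa using hj
      · rw [if_neg hrc, Nat.zero_testBit] at hj
        simp at hj
  have hqbit : ∀ i, ∀ j, j < y →
      (odd ^^^ (if (rowflip >>> i) &&& 1 == 1 then (1 <<< y) - 1 else 0)).testBit j
        = (odd.testBit j ^^ rowflip.testBit i) := by
    intro i j hjy
    rw [Nat.testBit_xor]
    by_cases hrc : ((rowflip >>> i) &&& 1 == 1)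
    · rw [if_pos hrc, pvTestBit_full]
      have : rowflip.testBit i = true := by rw [← pvShiftAndOne]; exact hrc
      simp [this, hjy]
    · rw [if_neg hrc]
      have : rowflip.testBit i = false := by
        rw [← pvShiftAndOne]
        simpa using hrc
      simp [this, Nat.zero_testBit]
  rw [pvEqIffGetD [] b target (by rw [hb, htl]), hb]
  rw [List.all_eq_true]
  constructor
  · intro hbt i hi
    have hiN := List.mem_range.mp hi
    rw [hE i hiN, hF i hiN]
    apply beq_iff_eq.mpr
    apply Nat.eq_of_testBit_eq
    intro j
    rw [pvMask_testBit _ _ y _ (hq i) j, pvTestBit_full]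
    by_cases hjy : j < y
    · have h1 := hbt i hiN
      have h2 := congrArg (fun r => r.getD j 0) h1
      simp only at h2
      rw [hcell i hiN j hjy] at h2
      rw [hqbit i j hjy]
      have : (if (odd.testBit j ^^ rowflip.testBit i) then 1 - (beginning.getD i []).getD j 0
          else (beginning.getD i []).getD j 0) = (target.getD i []).getD j 0 := by
        rw [Bool.xor_comm (odd.testBit j)]
        exact h2
      rw [beq_iff_eq.mpr this]
      simp [hjy]
    · simp [hjy]
  · intro hall i hiN
    have hitlen : (target.getD i []).length = y := pvTargetRowLen beginning target y htl hty i hiN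
    have hmask := hall i (List.mem_range.mpr hiN)
    rw [hE i hiN, hF i hiN] at hmask
    have hmaskEq := beq_iff_eq.mp hmask
    rw [pvEqIffGetD 0 _ _ (by rw [hrow i hiN, hitlen])]
    intro j hjB
    have hjy : j < y := by rw [← hrow i hiN]; exact hjB
    have hbit := congrArg (fun n => n.testBit j) hmaskEq
    simp only at hbit
    rw [pvMask_testBit _ _ y _ (hq i) j, pvTestBit_full, hqbit i j hjy] at hbit
    simp only [hjy, decide_true, Bool.true_and] at hbit
    have hval : (if (odd.testBit j ^^ rowflip.testBit i) then 1 - (beginning.getD i []).getD j 0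
        else (beginning.getD i []).getD j 0) = (target.getD i []).getD j 0 := by
      exact beq_iff_eq.mp hbit
    rw [hcell i hiN j hjy]
    have hcomm : pvCellP beginning (rowflip.testBit i ^^ odd.testBit j) i j
        = pvCellP beginning (odd.testBit j ^^ rowflip.testBit i) i j := by
      rw [Bool.xor_comm]
    rw [hcomm]
    exact hval


-- ===== VERDICT (by name: the statement is the Claim_ definition above) =====
theorem solution_spec : Claim_equal_solution := by
  unfold Claim_equal_solution
  intro beginning target _ hpre
  unfold Spec_solution
  by_cases heq : beginning = target
  · simp [solution, solution_alt, heq]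
  · obtain ⟨hne, htl, hbrow, htrow⟩ := hpre.resolve_left heq
    unfold solution solution_alt
    rw [if_neg heq, if_neg heq]
    dsimp only
    have hE : ∀ i, i < beginning.length →
        ((((beginning.zip target).map (fun bt => pvMasksRow bt.1 bt.2 (beginning.getD 0 []).length)).map Prod.fst).getD i 0
          = (pvMasksRow (beginning.getD i []) (target.getD i []) (beginning.getD 0 []).length).1) :=
      fun i hi => (pvE_getD beginning target _ htl i hi).1
    have hF : ∀ i, i < beginning.length →
        ((((beginning.zip target).map (fun bt => pvMasksRow bt.1 bt.2 (beginning.getD 0 []).length)).map Prod.snd).getD i 0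
          = (pvMasksRow (beginning.getD i []) (target.getD i []) (beginning.getD 0 []).length).2) :=
      fun i hi => (pvE_getD beginning target _ htl i hi).2
    have hInv0 : pvInvB beginning ((beginning.getD 0 []).length) beginning 0 0 := by
      refine ⟨rfl, ?_, ?_⟩
      · intro i hi
        rw [List.getD_eq_getElem?_getD, List.getElem?_eq_getElem hi]
        exact hbrow _ (List.getElem_mem _)
      · intro i hi j hj
        simp [pvCellP, Nat.zero_testBit]
    obtain ⟨hans, hInv, hodd⟩ := pvMainB beginning target _ htl htrow _ _ hE hF
      (List.range beginning.length) List.nodup_range (fun k hk => List.mem_range.mp hk)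
      beginning 0 0 0 hInv0 (fun j hj => by rw [Nat.zero_testBit] at hj; cases hj)
      (fun i _ => Nat.zero_testBit i)
    have hfin := pvFinalIffB beginning target _ htl htrow _ _ hE hF _ _ _ hInv hodd
    by_cases hbt : (List.foldl (pvStepA target beginning.length (beginning.getD 0 []).length)
        (beginning, 0) (List.range beginning.length)).1 = target
    · rw [if_neg (not_not_intro hbt), if_pos (hfin.mp hbt)]
      exact hans
    · rw [if_pos hbt, if_neg (fun hh => hbt (hfin.mpr hh))]
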